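-- pv_equiv track=rewrite | github.com/eric-mugnier/tete-de-veau-ravigote | personnages_builder.py | strip_braced_cmd
-- ===== SOURCE A (Python) =====
-- def strip_braced_cmd(text, cmd):
--     """Supprime toutes les occurrences de \\cmd{...} (avec braces imbriquées)."""
--     result = []
--     i = 0
--     marker = "\\" + cmd + "{"
--     while i < len(text):
--         if text[i:i+len(marker)] == marker:
--             depth = 0
--             j = i + len(marker) - 1  # pointe sur '{'
--             while j < len(text):
--                 if text[j] == "{":
--                     depth += 1
--                 elif text[j] == "}":
--                     depth -= 1
--                     if depth == 0:
--                         i = j + 1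
--                         break
--                 j += 1
--             else:
--                 i = j
--         else:
--             result.append(text[i])
--             i += 1
--     return "".join(result)
-- ===== SOURCE B (Python) =====
-- def strip_braced_cmd(text, cmd):
--     """Supprime toutes les occurrences de \\cmd{...} (avec braces imbriquées)."""
--     marker = "\\" + cmd + "{"
--     parts = []
--     i = 0
--     while True:
--         pos = text.find(marker, i)
--         if pos == -1:
--             parts.append(text[i:])
--             return "".join(parts)
--         parts.append(text[i:pos])
--         depth = 0
--         j = pos + len(marker) - 1  # the '{'
--         while j < len(text):
--             ch = text[j]
--             if ch == "{":
--                 depth += 1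
--             elif ch == "}":
--                 depth -= 1
--                 if depth == 0:
--                     break
--             j += 1
--         i = j + 1
-- ===== Notes on version B (the rewrite author's own statement) =====
-- stated objective: faster
-- what changed: Outer traversal driven by str.find: copies whole inter-match chunks by slicing instead of A's per-character marker-slice comparison and append; same brace-depth inner matcher.
import Mathlib
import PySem

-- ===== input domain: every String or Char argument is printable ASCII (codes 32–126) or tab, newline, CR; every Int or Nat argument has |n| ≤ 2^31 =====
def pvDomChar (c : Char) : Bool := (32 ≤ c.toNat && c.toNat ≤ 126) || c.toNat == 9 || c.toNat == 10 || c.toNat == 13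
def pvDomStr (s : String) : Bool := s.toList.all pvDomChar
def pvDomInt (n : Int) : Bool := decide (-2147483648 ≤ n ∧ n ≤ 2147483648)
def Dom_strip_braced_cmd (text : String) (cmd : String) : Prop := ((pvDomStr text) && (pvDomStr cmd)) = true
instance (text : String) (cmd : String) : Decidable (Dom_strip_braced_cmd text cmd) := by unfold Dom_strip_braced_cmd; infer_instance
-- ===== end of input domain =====

-- B rewrite: find-driven chunk copying (whole segments between marker matches) instead of A's per-character marker-slice test and append; same inner brace matcher (objective: faster, measured).

-- ===== PORT A =====
-- marker = "\\" + cmd + "{", as a char list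
def pvMarker (cmd : String) : List Char := '\\' :: (cmd.toList ++ ['{'])

-- A's inner while loop: scan from the '{', return the suffix after the matching '}' ([] if it falls off the end, i.e. i = j = len)
def pvSkipA (depth : Int) (cs : List Char) : List Char :=
  match cs with
  | [] => []
  | c :: rest =>
    if c = '{' then pvSkipA (depth + 1) rest
    else if c = '}' then
      if depth - 1 = 0 then rest else pvSkipA (depth - 1) rest
    else pvSkipA depth rest

theorem pvSkipA_le (depth : Int) (cs : List Char) : (pvSkipA depth cs).length ≤ cs.length := by
  induction cs generalizing depth with
  | nil => simp [pvSkipA]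
  | cons c rest ih =>
    simp only [pvSkipA]
    split_ifs <;> simp only [List.length_cons] <;>
      first
      | exact Nat.le_succ_of_le (ih _)
      | omega

-- A's outer while loop: i ↔ the remaining suffix cs, result ↔ acc (appended left-to-right)
def pvLoopA (cmd : String) (cs : List Char) (acc : List Char) : List Char :=
  match cs with
  | [] => acc
  | c :: rest =>
    if (pvMarker cmd).isPrefixOf (c :: rest) then
      pvLoopA cmd (pvSkipA 0 ((c :: rest).drop ((pvMarker cmd).length - 1))) acc
    else
      pvLoopA cmd rest (acc ++ [c])
termination_by cs.length
decreasing_by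
  · have h1 := pvSkipA_le 0 ((c :: rest).drop ((pvMarker cmd).length - 1))
    have h2 : ((c :: rest).drop ((pvMarker cmd).length - 1)).length ≤ rest.length := by
      simp [pvMarker, List.length_drop]
    simp only [List.length_cons]; omega
  · simp

def strip_braced_cmd (text : String) (cmd : String) : String :=
  String.ofList (pvLoopA cmd text.toList [])

-- ===== PORT B =====
-- text.find(marker, i) on the remaining suffix: split cs at the first occurrence of m
def pvFindSplit (m : List Char) (cs : List Char) : Option (List Char × List Char) :=
  if m.isPrefixOf cs then some ([], cs)
  else
    match cs with
    | [] => none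
    | c :: rest => (pvFindSplit m rest).map (fun p => (c :: p.1, p.2))
termination_by cs.length

-- B's inner brace loop (identical matcher to A's, B's own copy)
def pvSkipB (depth : Int) (cs : List Char) : List Char :=
  match cs with
  | [] => []
  | c :: rest =>
    if c = '{' then pvSkipB (depth + 1) rest
    else if c = '}' then
      if depth - 1 = 0 then rest else pvSkipB (depth - 1) rest
    else pvSkipB depth rest

theorem pvSkipB_le (depth : Int) (cs : List Char) : (pvSkipB depth cs).length ≤ cs.length := by
  induction cs generalizing depth with
  | nil => simp [pvSkipB]
  | cons c rest ih =>
    simp only [pvSkipB]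
    split_ifs <;> simp only [List.length_cons] <;>
      first
      | exact Nat.le_succ_of_le (ih _)
      | omega

theorem pvFindSplit_some {m cs pre suf : List Char}
    (h : pvFindSplit m cs = some (pre, suf)) :
    cs = pre ++ suf ∧ m.isPrefixOf suf = true := by
  induction cs generalizing pre suf with
  | nil =>
    rw [pvFindSplit.eq_def] at h
    split_ifs at h with hp
    · simp only [Option.some.injEq, Prod.mk.injEq] at h
      obtain ⟨h1, h2⟩ := h; subst h1; subst h2; exact ⟨rfl, hp⟩
  | cons c rest ih =>
    rw [pvFindSplit.eq_def] at h
    split_ifs at h with hp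
    · simp only [Option.some.injEq, Prod.mk.injEq] at h
      obtain ⟨h1, h2⟩ := h; subst h1; subst h2; exact ⟨rfl, hp⟩
    · simp only [Option.map_eq_some_iff] at h
      obtain ⟨⟨p', s'⟩, hfs, heq⟩ := h
      simp only [Prod.mk.injEq] at heq
      obtain ⟨h1, h2⟩ := heq
      obtain ⟨hcs, hpre⟩ := ih hfs
      subst h2
      constructor
      · rw [← h1]; simp [hcs]
      · exact hpre

-- B's outer loop: find the marker, copy the chunk before it, skip the braced group, recurse
def pvLoopB (cmd : String) (cs : List Char) : List Char :=
  match h : pvFindSplit (pvMarker cmd) cs with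
  | none => cs
  | some (pre, suf) =>
    pre ++ pvLoopB cmd (pvSkipB 0 (suf.drop ((pvMarker cmd).length - 1)))
termination_by cs.length
decreasing_by
  obtain ⟨hcs, hpre⟩ := pvFindSplit_some h
  have h1 := pvSkipB_le 0 (suf.drop ((pvMarker cmd).length - 1))
  have h2 : (pvMarker cmd).length ≤ suf.length := (List.isPrefixOf_iff_prefix.mp hpre).length_le
  have h3 : (pvMarker cmd).length = cmd.toList.length + 2 := by simp [pvMarker]
  have h4 : cs.length = pre.length + suf.length := by simp [hcs]
  simp only [List.length_drop] at h1
  omega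

def strip_braced_cmd_alt (text : String) (cmd : String) : String :=
  String.ofList (pvLoopB cmd text.toList)

-- ===== PRECONDITION & SPEC =====
def Spec_strip_braced_cmd (text : String) (cmd : String) (out : String) : Prop := out = strip_braced_cmd_alt text cmd
instance (text : String) (cmd : String) (out : String) : Decidable (Spec_strip_braced_cmd text cmd out) := by unfold Spec_strip_braced_cmd; infer_instance

-- ===== CLAIM (what is proved, stated in full; the proofs are below) =====
def Claim_equal_strip_braced_cmd : Prop := ∀ (text : String) (cmd : String), Dom_strip_braced_cmd text cmd → Spec_strip_braced_cmd text cmd (strip_braced_cmd text cmd)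

-- ===== LEMMAS AND PROOFS =====

theorem pvSkip_eq (depth : Int) (cs : List Char) : pvSkipA depth cs = pvSkipB depth cs := by
  induction cs generalizing depth with
  | nil => rfl
  | cons c rest ih => simp only [pvSkipA, pvSkipB]; split_ifs <;> simp [ih]

theorem pvMarker_ne_nil (cmd : String) : pvMarker cmd ≠ [] := by simp [pvMarker]

theorem pvFindSplit_nil (m : List Char) (hm : m ≠ []) : pvFindSplit m [] = none := by
  rw [pvFindSplit.eq_def]
  simp [List.isPrefixOf_iff_prefix, hm]

theorem pvLoopB_nil (cmd : String) : pvLoopB cmd [] = [] := by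
  rw [pvLoopB.eq_def]
  split
  · rfl
  · next h => rw [pvFindSplit_nil _ (pvMarker_ne_nil cmd)] at h; exact absurd h (by simp)

theorem pvLoopB_none {cmd : String} {cs : List Char}
    (h : pvFindSplit (pvMarker cmd) cs = none) : pvLoopB cmd cs = cs := by
  rw [pvLoopB.eq_def]
  split
  · rfl
  · next pre suf heq => rw [h] at heq; cases heq

theorem pvLoopB_some {cmd : String} {cs pre suf : List Char}
    (h : pvFindSplit (pvMarker cmd) cs = some (pre, suf)) :
    pvLoopB cmd cs = pre ++ pvLoopB cmd (pvSkipB 0 (suf.drop ((pvMarker cmd).length - 1))) := by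
  rw [pvLoopB.eq_def]
  split
  · next heq => rw [h] at heq; cases heq
  · next p s heq =>
    rw [h] at heq
    injection heq with heq
    injection heq with h1 h2
    subst h1; subst h2; rfl

theorem pvLoopB_cons_not_prefix (cmd : String) (c : Char) (rest : List Char)
    (hp : ¬ (pvMarker cmd).isPrefixOf (c :: rest) = true) :
    pvLoopB cmd (c :: rest) = c :: pvLoopB cmd rest := by
  have hfs : pvFindSplit (pvMarker cmd) (c :: rest)
      = (pvFindSplit (pvMarker cmd) rest).map (fun p => (c :: p.1, p.2)) := by
    rw [pvFindSplit.eq_def]; simp [hp]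
  rcases h : pvFindSplit (pvMarker cmd) rest with _ | ⟨pre, suf⟩ <;>
    rw [h] at hfs <;> simp only [Option.map_some, Option.map_none] at hfs
  · rw [pvLoopB_none hfs, pvLoopB_none h]
  · rw [pvLoopB_some hfs, pvLoopB_some h]
    rfl

theorem pvLoopB_prefix (cmd : String) (cs : List Char)
    (hp : (pvMarker cmd).isPrefixOf cs = true) :
    pvLoopB cmd cs = pvLoopB cmd (pvSkipB 0 (cs.drop ((pvMarker cmd).length - 1))) := by
  have hfs : pvFindSplit (pvMarker cmd) cs = some ([], cs) := by
    rw [pvFindSplit.eq_def]; simp [hp]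
  rw [pvLoopB_some hfs]
  rfl

theorem pvLoop_eq (cmd : String) :
    ∀ n (cs : List Char), cs.length ≤ n → ∀ acc, pvLoopA cmd cs acc = acc ++ pvLoopB cmd cs := by
  intro n
  induction n with
  | zero =>
    intro cs hlen acc
    have : cs = [] := by cases cs <;> simp_all
    subst this
    simp [pvLoopA, pvLoopB_nil]
  | succ n ih =>
    intro cs hlen acc
    match cs with
    | [] => simp [pvLoopA, pvLoopB_nil]
    | c :: rest =>
      rw [pvLoopA]
      by_cases hp : (pvMarker cmd).isPrefixOf (c :: rest) = true
      · simp only [hp, if_true]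
        have hd : ((c :: rest).drop ((pvMarker cmd).length - 1)).length ≤ rest.length := by
          simp [pvMarker, List.length_drop]
        have hs := pvSkipA_le 0 ((c :: rest).drop ((pvMarker cmd).length - 1))
        rw [ih _ (by simp at hlen; omega) acc]
        rw [pvLoopB_prefix cmd (c :: rest) hp, pvSkip_eq]
      · simp only [hp, Bool.false_eq_true, if_false]
        rw [ih rest (by simp at hlen; omega) (acc ++ [c])]
        rw [pvLoopB_cons_not_prefix cmd c rest hp]
        simp

-- ===== VERDICT (by name: the statement is the Claim_ definition above) =====
theorem strip_braced_cmd_spec : Claim_equal_strip_braced_cmd := by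
  intro text cmd _
  unfold Spec_strip_braced_cmd strip_braced_cmd strip_braced_cmd_alt
  rw [pvLoop_eq cmd text.toList.length text.toList le_rfl []]
  simp
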